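-- pv_equiv track=rewrite | github.com/Ravi-0412/DSA-Program-And-Notes | Dynamic Programming/Longest_Common_Subsequence/Shortest Uncommon Subsequence.py | shortestUnSub
-- ===== SOURCE A (Python) =====
-- def shortestUnSub(s, t):
--
--     def UnSub(i, j):
--         if i == m:
--             return 1000
--         if j == n:
--             # means there is some char in 's' and 't' is empty.
--             # so any of the char from 's' can be our ans.
--             # dp[i][j] = 1
--             return 1
--         if dp[i][j] != -1:
--             return dp[i][j]
--         # check if s[i] is present in t or not
--         # if not present then this char can be ans only so return '1'
--         k = j
--         while k < n:
--             if t[k] == s[i]: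
--                 break
--             k += 1
--         if k == n:
--             # means s[i] is not present so simply return 1
--             dp[i][j] = 1
--             return 1
--         # Now it means 's[i]' is present.
--         # In this case we have two possibility :
--         # 1) include 's[i]' and 2) Don't include s[i] .
--         # for ans take minimum of both.
--         dp[i][j] = min(1 + UnSub(i + 1, k + 1) , UnSub(i + 1, j))
--         return dp[i][j]
--
--     m , n = len(s) , len(t)
--     dp = [[-1 for j in range(n + 1)] for i in range(m + 1)]
--     ans = UnSub(0, 0)
--     return ans if ans <= 500 else -1
-- ===== SOURCE B (Python) =====
-- def shortestUnSub(s, t):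
--     m, n = len(s), len(t)
--     # next-occurrence table: nxt[j] maps char c -> smallest k >= j with t[k] == c
--     nxt = [None] * (n + 1)
--     nxt[n] = {}
--     for j in range(n - 1, -1, -1):
--         e = dict(nxt[j + 1])
--         e[t[j]] = j
--         nxt[j] = e
--     # bottom-up DP: row[j] = answer for suffix s[i:] versus t[j:]
--     row = [1000] * (n + 1)          # i == m
--     for i in range(m - 1, -1, -1):
--         new = [0] * (n + 1)
--         new[n] = 1
--         for j in range(n):
--             k = nxt[j].get(s[i])
--             new[j] = 1 if k is None else min(1 + row[k + 1], row[j])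
--         row = new
--     ans = row[0]
--     return ans if ans <= 500 else -1
-- ===== Notes on version B (the rewrite author's own statement) =====
-- stated objective: faster
-- what changed: Replaces A's memoized top-down recursion, whose inner while-loop rescans t for each state, by a bottom-up DP over a single row combined with a precomputed next-occurrence table nxt[j][c], making the inner scan an O(1) dictionary lookup.
import Mathlib
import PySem

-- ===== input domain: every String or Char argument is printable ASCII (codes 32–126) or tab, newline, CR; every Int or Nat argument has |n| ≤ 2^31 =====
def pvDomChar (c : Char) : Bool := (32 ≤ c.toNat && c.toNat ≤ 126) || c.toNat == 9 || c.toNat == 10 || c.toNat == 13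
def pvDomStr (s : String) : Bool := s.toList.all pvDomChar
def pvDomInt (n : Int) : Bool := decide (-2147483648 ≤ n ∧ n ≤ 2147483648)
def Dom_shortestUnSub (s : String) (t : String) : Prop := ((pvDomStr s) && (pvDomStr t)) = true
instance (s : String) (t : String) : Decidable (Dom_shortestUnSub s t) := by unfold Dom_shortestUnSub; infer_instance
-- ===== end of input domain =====

-- B replaces A's memoized recursion with inner linear scans by a bottom-up DP over a
-- precomputed next-occurrence table (O(m*n) vs O(m*n^2)); measured faster at large sizes.

-- ===== PORT A =====
-- A's inner `while k < n: if t[k] == s[i]: break; k += 1` scan.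
def pvScanA (t : List Char) (c : Char) (k : Nat) : Nat :=
  if h : k < t.length then
    if t[k] = c then k else pvScanA t c (k + 1)
  else k
termination_by t.length - k

-- A's recursion UnSub(i, j), with i represented by the suffix s[i:] of s.
-- A's dp memo table only caches values this recursion already returns (never -1),
-- so it does not affect the result and is omitted from the port.
def pvUnSubA (t : List Char) : List Char → Nat → Int
  | [], _ => 1000
  | c :: rest, j =>
    if j = t.length then 1
    else
      let k := pvScanA t c j
      if k = t.length then 1
      else min (1 + pvUnSubA t rest (k + 1)) (pvUnSubA t rest j)

def shortestUnSub (s : String) (t : String) : Int :=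
  let ans := pvUnSubA t.toList s.toList 0
  if ans ≤ 500 then ans else -1

-- ===== PORT B =====
-- nxt[j] maps a char c to the smallest k ≥ j with t[k] = c (built back to front, as in Source B).
def pvBuildNxt : List Char → Nat → List (PySem.Dict Char Nat)
  | [], _ => [PySem.Dict.empty]
  | c :: rest, j =>
    let tail := pvBuildNxt rest (j + 1)
    (PySem.Dict.insert (tail.headD PySem.Dict.empty) c j) :: tail

-- one inner `for j in range(n)` pass of Source B (plus new[n] = 1)
def pvStepRow (nxtT : List (PySem.Dict Char Nat)) (n : Nat) (c : Char) (row : List Int) : List Int :=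
  ((List.range n).map (fun j =>
    match PySem.Dict.get? (nxtT.getD j PySem.Dict.empty) c with
    | none => 1
    | some k => min (1 + row.getD (k + 1) 0) (row.getD j 0))) ++ [1]

def shortestUnSub_alt (s : String) (t : String) : Int :=
  let n := t.toList.length
  let nxtT := pvBuildNxt t.toList 0
  -- the `for i in range(m-1, -1, -1)` loop: row(i) = step s[i] row(i+1), i.e. a right fold over s
  let row := s.toList.foldr (pvStepRow nxtT n) (List.replicate (n + 1) 1000)
  let ans := row.getD 0 1000
  if ans ≤ 500 then ans else -1

-- ===== PRECONDITION & SPEC =====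
def Spec_shortestUnSub (s : String) (t : String) (out : Int) : Prop := out = shortestUnSub_alt s t
instance (s : String) (t : String) (out : Int) : Decidable (Spec_shortestUnSub s t out) := by unfold Spec_shortestUnSub; infer_instance

-- ===== CLAIM (what is proved, stated in full; the proofs are below) =====
def Claim_equal_shortestUnSub : Prop := ∀ (s : String) (t : String), Dom_shortestUnSub s t → Spec_shortestUnSub s t (shortestUnSub s t)

-- ===== LEMMAS AND PROOFS =====

-- number of elements of l strictly before the first occurrence of c (= l.length if absent)
def pvFirst (c : Char) : List Char → Nat
  | [] => 0
  | x :: xs => if x = c then 0 else 1 + pvFirst c xs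

theorem pvFirst_le (c : Char) (l : List Char) : pvFirst c l ≤ l.length := by
  induction l with
  | nil => simp [pvFirst]
  | cons x xs ih => simp only [pvFirst, List.length_cons]; split <;> omega

theorem pvScanA_eq (t : List Char) (c : Char) (k : Nat) :
    pvScanA t c k = k + pvFirst c (t.drop k) := by
  fun_induction pvScanA t c k with
  | case1 k hlt hit =>
    have hd : t.drop k = t[k] :: t.drop (k + 1) := List.drop_eq_getElem_cons hlt
    simp [hd, pvFirst, hit]
  | case2 k hlt hmiss ih =>
    have hd : t.drop k = t[k] :: t.drop (k + 1) := List.drop_eq_getElem_cons hlt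
    rw [ih, hd]
    simp [pvFirst, hmiss]
    omega
  | case3 k hnlt =>
    have hd : t.drop k = [] := List.drop_eq_nil_of_le (by omega)
    simp [hd, pvFirst]

theorem pvBuildNxt_get (l : List Char) (j0 : Nat) (i : Nat) (c : Char) (hi : i ≤ l.length) :
    PySem.Dict.get? ((pvBuildNxt l j0).getD i PySem.Dict.empty) c =
      (if pvFirst c (l.drop i) = (l.drop i).length then none
       else some (j0 + i + pvFirst c (l.drop i))) := by
  induction l generalizing j0 i with
  | nil =>
    have : i = 0 := by simpa using hi
    subst this
    simp [pvBuildNxt, PySem.Dict.empty, PySem.Dict.get?, pvFirst]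
  | cons x xs ih =>
    match i with
    | 0 =>
      have hhead : (pvBuildNxt xs (j0 + 1)).headD PySem.Dict.empty
          = (pvBuildNxt xs (j0 + 1)).getD 0 PySem.Dict.empty := by
        cases pvBuildNxt xs (j0 + 1) <;> simp
      simp only [pvBuildNxt, List.getD_cons_zero, List.drop_zero]
      rw [PySem.Dict.get?_insert, hhead, ih (j0 + 1) 0 (by omega)]
      by_cases hcx : c = x
      · simp [hcx, pvFirst]
      · have hxc : ¬ x = c := fun h => hcx h.symm
        have := pvFirst_le c xs
        simp only [hcx, pvFirst, hxc, List.drop_zero, List.length_cons]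
        split_ifs <;> first | rfl | omega | (congr 1; omega)
    | i' + 1 =>
      simp only [pvBuildNxt, List.getD_cons_succ, List.drop_succ_cons]
      rw [ih (j0 + 1) i' (by simpa using hi)]
      split_ifs <;> first | rfl | (congr 1; omega)

theorem pvRow_get (t s : List Char) (j : Nat) (hj : j ≤ t.length) :
    (s.foldr (pvStepRow (pvBuildNxt t 0) t.length) (List.replicate (t.length + 1) 1000))[j]?
      = some (pvUnSubA t s j) := by
  induction s generalizing j with
  | nil =>
    simp [pvUnSubA, Nat.lt_succ_of_le hj]
  | cons c rest ih =>
    simp only [List.foldr_cons]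
    set row := rest.foldr (pvStepRow (pvBuildNxt t 0) t.length) (List.replicate (t.length + 1) 1000) with hrow
    have ihD : ∀ j, j ≤ t.length → row.getD j 0 = pvUnSubA t rest j := by
      intro j hj
      rw [List.getD_eq_getElem?_getD, ih j hj]
      rfl
    rcases Nat.lt_or_eq_of_le hj with hlt | heq
    · -- j < t.length : the mapped entry
      have hmap : (pvStepRow (pvBuildNxt t 0) t.length c row)[j]?
          = some (match PySem.Dict.get? ((pvBuildNxt t 0).getD j PySem.Dict.empty) c with
             | none => (1 : Int)
             | some k => min (1 + row.getD (k + 1) 0) (row.getD j 0)) := by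
        rw [pvStepRow, List.getElem?_append_left (by simpa using hlt),
          List.getElem?_map, List.getElem?_range hlt]
        rfl
      rw [hmap, pvBuildNxt_get t 0 j c hj]
      have hscan := pvScanA_eq t c j
      have hdlen : (t.drop j).length = t.length - j := by simp
      have hfl := pvFirst_le c (t.drop j)
      split_ifs with habs
      · -- char absent: the while loop runs to n
        have hk : pvScanA t c j = t.length := by rw [hscan, habs, hdlen]; omega
        simp [pvUnSubA, Nat.ne_of_lt hlt, hk]
      · -- char found at k < n
        have hklt : pvScanA t c j < t.length := by rw [hscan]; omega
        have hkval : 0 + j + pvFirst c (t.drop j) = pvScanA t c j := by rw [hscan]; omega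
        rw [hkval]
        have hred : (match some (pvScanA t c j) with
            | none => (1 : Int)
            | some k => min (1 + row.getD (k + 1) 0) (row.getD j 0))
          = min (1 + row.getD (pvScanA t c j + 1) 0) (row.getD j 0) := rfl
        rw [hred]
        rw [ihD (pvScanA t c j + 1) (by omega), ihD j (by omega)]
        simp [pvUnSubA, Nat.ne_of_lt hlt, Nat.ne_of_lt hklt]
    · -- j = t.length : the appended [1]
      subst heq
      simp [pvStepRow, pvUnSubA]

-- ===== VERDICT (by name: the statement is the Claim_ definition above) =====
theorem shortestUnSub_spec : Claim_equal_shortestUnSub := by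
  intro s t _
  unfold Spec_shortestUnSub
  simp only [shortestUnSub, shortestUnSub_alt, List.getD_eq_getElem?_getD,
    pvRow_get t.toList s.toList 0 (by omega), Option.getD_some]
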